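-- pv_equiv track=rewrite | github.com/capyBearista/codepath | TIP102/3-2.py | final_supply_costs
-- ===== SOURCE A (Python) =====
-- def final_supply_costs(costs):
--     n = len(costs)
--     final_costs = costs[:]
--     stack = []
--
--     for i in range(n):
--         # time complexity O(n)
--         while stack and costs[stack[-1]] >= costs[i]:
--             j = stack.pop()
--             final_costs[j] -= costs[i]
--         stack.append(i)
--
--     return final_costs
-- ===== SOURCE B (Python) =====
-- def final_supply_costs(costs):
--     n = len(costs)
--     result = []
--     for j, c in enumerate(costs):
--         i = j + 1
--         while i < n and costs[i] > c:
--             i += 1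
--         result.append(c - costs[i] if i < n else c)
--     return result
-- ===== Notes on version B (the rewrite author's own statement) =====
-- stated objective: simpler
-- what changed: Replaces A's monotonic-stack pass with in-place mutation of a copied list by a direct per-index forward scan to the first later cost <= the current one, building the result list directly.
import Mathlib
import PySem

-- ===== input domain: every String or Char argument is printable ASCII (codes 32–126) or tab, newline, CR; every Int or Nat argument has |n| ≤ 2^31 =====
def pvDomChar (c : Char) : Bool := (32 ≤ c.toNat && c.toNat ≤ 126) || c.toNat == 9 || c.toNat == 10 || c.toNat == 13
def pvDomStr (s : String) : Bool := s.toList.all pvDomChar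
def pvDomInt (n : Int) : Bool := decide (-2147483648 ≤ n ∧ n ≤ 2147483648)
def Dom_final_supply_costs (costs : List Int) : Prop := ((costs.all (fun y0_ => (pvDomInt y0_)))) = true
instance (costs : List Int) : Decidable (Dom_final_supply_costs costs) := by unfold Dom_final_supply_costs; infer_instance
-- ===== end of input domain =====

-- B replaces A's monotonic-stack pass by a per-index scan of the tail for the first
-- later cost ≤ the current one, building the result list directly (objective: simpler).

-- ===== PORT A =====
-- the inner `while stack and costs[stack[-1]] >= costs[i]` loop of A; the stack is
-- kept head-first (head = Python's stack[-1]); all indices used stay in range, so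
-- getD is exact for Python's costs[j] / final_costs[j].
def pvPopAll (costs : List Int) (ci : Int) : List Int → List Nat → List Int × List Nat
  | final, [] => (final, [])
  | final, j :: st =>
      if costs.getD j 0 ≥ ci then
        pvPopAll costs ci (final.set j (final.getD j 0 - ci)) st
      else (final, j :: st)

-- the outer `for i in range(n)` loop of A over the remaining indices
def pvAGo (costs : List Int) : List Nat → List Int → List Nat → List Int
  | [], final, _ => final
  | i :: is, final, st =>
      let p := pvPopAll costs (costs.getD i 0) final st
      pvAGo costs is p.1 (i :: p.2)

def final_supply_costs (costs : List Int) : List Int :=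
  pvAGo costs (List.range costs.length) costs []

-- ===== PORT B =====
-- the inner `while i < n and costs[i] > c: i += 1` of B; the counter i starts at
-- j+1 ≥ 1 and only grows, so it is kept as a Nat and getD is exact for costs[i]
def pvScan (costs : List Int) (c : Int) (i : Nat) : Nat :=
  if h : i < costs.length then
    if costs.getD i 0 > c then pvScan costs c (i+1) else i
  else i
termination_by costs.length - i

-- for j, c in enumerate(costs): i = j+1; while ...; result.append(c - costs[i] if i < n else c)
def final_supply_costs_alt (costs : List Int) : List Int :=
  (PySem.List.enumerate costs).foldl
    (fun result jc =>
      result ++ [if pvScan costs jc.2 (jc.1.toNat + 1) < costs.length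
        then jc.2 - costs.getD (pvScan costs jc.2 (jc.1.toNat + 1)) 0 else jc.2]) []

-- ===== PRECONDITION & SPEC =====
def Spec_final_supply_costs (costs : List Int) (out : List Int) : Prop := out = final_supply_costs_alt costs
instance (costs : List Int) (out : List Int) : Decidable (Spec_final_supply_costs costs out) := by unfold Spec_final_supply_costs; infer_instance

-- ===== CLAIM (what is proved, stated in full; the proofs are below) =====
def Claim_equal_final_supply_costs : Prop := ∀ (costs : List Int), Dom_final_supply_costs costs → Spec_final_supply_costs costs (final_supply_costs costs)

-- ===== LEMMAS AND PROOFS =====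

-- cost at index j (0 beyond the end; the indices used stay in range)
def pvC (costs : List Int) (j : Nat) : Int := costs.getD j 0

-- the value B computes at index j: subtract the first later cost ≤ costs[j], if any
def pvSpec (costs : List Int) (j : Nat) : Int :=
  match (costs.drop (j+1)).find? (fun x => decide (x ≤ pvC costs j)) with
  | none => pvC costs j
  | some x => pvC costs j - x

-- A's loop invariant before step i (`res` bounds the witness index of already
-- resolved entries: `i` on entry to step i, `i+1` while step i is popping):
-- stack indices are < i, strictly decreasing, with strictly decreasing costs;
-- stacked j still holds its own cost and has seen no later cost ≤ it;
-- popped j holds costs[j] - costs[m] for the FIRST m > j with costs[m] ≤ costs[j];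
-- indices ≥ i are untouched.
def pvInv (costs final : List Int) (i res : Nat) (st : List Nat) : Prop :=
  final.length = costs.length ∧
  (∀ j ∈ st, j < i) ∧
  st.Pairwise (fun a b => b < a) ∧
  st.Pairwise (fun a b => pvC costs b < pvC costs a) ∧
  (∀ j ∈ st, final.getD j 0 = pvC costs j ∧
      ∀ m, j < m → m < i → pvC costs j < pvC costs m) ∧
  (∀ j, j < i → j ∉ st → ∃ m, j < m ∧ m < res ∧ pvC costs m ≤ pvC costs j ∧
      (∀ k, j < k → k < m → pvC costs j < pvC costs k) ∧
      final.getD j 0 = pvC costs j - pvC costs m) ∧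
  (∀ j, i ≤ j → final.getD j 0 = pvC costs j)

theorem pvFold_app {a b : Type} (g : a → b) :
    ∀ (l : List a) (acc : List b), l.foldl (fun r x => r ++ [g x]) acc = acc ++ l.map g
  | [], acc => by simp
  | x :: l, acc => by simp [List.foldl_cons, pvFold_app g l]

theorem pvGetD_set_eq (l : List Int) (j : Nat) (v : Int) (h : j < l.length) :
    (l.set j v).getD j 0 = v := by
  rw [List.getD_eq_getElem _ _ (by simpa using h)]
  exact List.getElem_set_self _

theorem pvGetD_set_ne (l : List Int) (j jj : Nat) (v : Int) (h : jj ≠ j) :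
    (l.set j v).getD jj 0 = l.getD jj 0 := by
  rcases Nat.lt_or_ge jj l.length with hlt | hge
  · rw [List.getD_eq_getElem _ _ (by simpa using hlt), List.getD_eq_getElem _ _ hlt]
    exact List.getElem_set_ne (fun hh => h hh.symm) _
  · rw [List.getD_eq_default _ _ (by simpa using hge), List.getD_eq_default _ _ hge]

theorem pvInv_mono (costs final : List Int) (i r r' : Nat) (st : List Nat)
    (h : pvInv costs final i r st) (hr : r ≤ r') : pvInv costs final i r' st := by
  obtain ⟨h1, h2, h3, h4, h5, h6, h7⟩ := h
  refine ⟨h1, h2, h3, h4, h5, ?_, h7⟩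
  intro j hj hjs
  obtain ⟨m, hm1, hm2, hm3, hm4, hm5⟩ := h6 j hj hjs
  exact ⟨m, hm1, by omega, hm3, hm4, hm5⟩

-- the while loop: pops every stacked j with costs[j] ≥ costs[i] (resolving it with
-- witness m = i), keeps the invariant, and leaves only entries with cost < costs[i]
theorem pvPopAll_spec (costs : List Int) (i : Nat) (hi : i ≤ costs.length) :
    ∀ (st : List Nat) (final : List Int), pvInv costs final i (i+1) st →
      pvInv costs (pvPopAll costs (pvC costs i) final st).1 i (i+1)
        (pvPopAll costs (pvC costs i) final st).2 ∧
      (∀ j ∈ (pvPopAll costs (pvC costs i) final st).2, pvC costs j < pvC costs i) := by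
  intro st
  induction st with
  | nil =>
      intro final h
      exact ⟨h, by simp [pvPopAll]⟩
  | cons j st ih =>
      intro final h
      obtain ⟨h1, h2, h3, h4, h5, h6, h7⟩ := h
      have hji : j < i := h2 j List.mem_cons_self
      have hjflen : j < final.length := by omega
      by_cases hge : costs.getD j 0 ≥ pvC costs i
      · have hstep : pvPopAll costs (pvC costs i) final (j :: st)
            = pvPopAll costs (pvC costs i)
                (final.set j (final.getD j 0 - pvC costs i)) st := by
          simp only [pvPopAll]
          rw [if_pos hge]
        rw [hstep]
        apply ih
        refine ⟨by simp [h1], fun jj hjj => h2 jj (List.mem_cons_of_mem _ hjj),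
          (List.pairwise_cons.1 h3).2, (List.pairwise_cons.1 h4).2, ?_, ?_, ?_⟩
        · intro jj hjj
          have hne : jj ≠ j := Nat.ne_of_lt ((List.pairwise_cons.1 h3).1 jj hjj)
          rw [pvGetD_set_ne _ _ _ _ hne]
          exact h5 jj (List.mem_cons_of_mem _ hjj)
        · intro jj hjji hjjs
          by_cases hjeq : jj = j
          · subst hjeq
            refine ⟨i, hji, by omega, hge, (h5 jj List.mem_cons_self).2, ?_⟩
            rw [pvGetD_set_eq _ _ _ hjflen, (h5 jj List.mem_cons_self).1]
          · have hnot : jj ∉ j :: st := by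
              intro hmem
              rcases List.mem_cons.1 hmem with heq | hmem'
              · exact hjeq heq
              · exact hjjs hmem'
            obtain ⟨m, hm1, hm2, hm3, hm4, hm5⟩ := h6 jj hjji hnot
            refine ⟨m, hm1, hm2, hm3, hm4, ?_⟩
            rw [pvGetD_set_ne _ _ _ _ hjeq]
            exact hm5
        · intro jj hjj
          have hne : jj ≠ j := by omega
          rw [pvGetD_set_ne _ _ _ _ hne]
          exact h7 jj hjj
      · have hstep : pvPopAll costs (pvC costs i) final (j :: st) = (final, j :: st) := by
          simp only [pvPopAll]
          rw [if_neg hge]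
        rw [hstep]
        refine ⟨⟨h1, h2, h3, h4, h5, h6, h7⟩, ?_⟩
        intro jj hjj
        have hjlt : pvC costs j < pvC costs i := by
          simpa [pvC] using lt_of_not_ge hge
        rcases List.mem_cons.1 hjj with rfl | hmem
        · exact hjlt
        · exact lt_trans ((List.pairwise_cons.1 h4).1 jj hmem) hjlt

-- `stack.append(i)` restores the invariant for step i+1
theorem pvPush_spec (costs final : List Int) (i : Nat) (st : List Nat)
    (h : pvInv costs final i (i+1) st)
    (hlt : ∀ j ∈ st, pvC costs j < pvC costs i) :
    pvInv costs final (i+1) (i+1) (i :: st) := by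
  obtain ⟨h1, h2, h3, h4, h5, h6, h7⟩ := h
  refine ⟨h1, ?_, ?_, ?_, ?_, ?_, ?_⟩
  · intro j hj
    rcases List.mem_cons.1 hj with rfl | hj
    · omega
    · exact Nat.lt_succ_of_lt (h2 j hj)
  · exact List.pairwise_cons.2 ⟨fun j hj => h2 j hj, h3⟩
  · exact List.pairwise_cons.2 ⟨hlt, h4⟩
  · intro j hj
    rcases List.mem_cons.1 hj with rfl | hmem
    · exact ⟨h7 j le_rfl, fun m hm1 hm2 => by omega⟩
    · refine ⟨(h5 j hmem).1, fun m hm1 hm2 => ?_⟩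
      rcases Nat.lt_or_ge m i with hmi | hmi
      · exact (h5 j hmem).2 m hm1 hmi
      · have hmeq : m = i := by omega
        exact hmeq ▸ hlt j hmem
  · intro j hj hjs
    have hji : j ≠ i := fun h => hjs (h ▸ List.mem_cons_self)
    have hjs' : j ∉ st := fun h => hjs (List.mem_cons_of_mem _ h)
    exact h6 j (by omega) hjs'
  · intro j hj
    exact h7 j (by omega)

theorem pvAGo_spec (costs : List Int) :
    ∀ (k i : Nat) (final : List Int) (st : List Nat), i + k = costs.length →
      pvInv costs final i i st →
      ∃ st', pvInv costs (pvAGo costs (List.range' i k) final st) costs.length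
        costs.length st' := by
  intro k
  induction k with
  | zero =>
      intro i final st hik h
      have hieq : i = costs.length := by omega
      subst hieq
      exact ⟨st, by simpa [pvAGo] using h⟩
  | succ k ih =>
      intro i final st hik h
      rw [List.range'_succ]
      have hi : i ≤ costs.length := by omega
      have h' := pvInv_mono costs final i i (i+1) st h (by omega)
      obtain ⟨hp, hlt⟩ := pvPopAll_spec costs i hi st final h'
      have hpush := pvPush_spec costs _ i _ hp hlt
      simp only [pvAGo]
      exact ih (i+1) _ _ (by omega) hpush

-- the invariant at i = n pins every entry of the final list to pvSpec
theorem pvExtract (costs F : List Int) (st : List Nat)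
    (h : pvInv costs F costs.length costs.length st) :
    F = (List.range costs.length).map (pvSpec costs) := by
  obtain ⟨h1, h2, h3, h4, h5, h6, h7⟩ := h
  apply List.ext_getElem
  · simp [h1]
  · intro k hk1 hk2
    have hk : k < costs.length := by omega
    have hFk : F.getD k 0 = F[k] := List.getD_eq_getElem F 0 hk1
    simp only [List.getElem_map, List.getElem_range]
    by_cases hmem : k ∈ st
    · obtain ⟨hv, hmin⟩ := h5 k hmem
      have hnone : (costs.drop (k+1)).find? (fun x => decide (x ≤ pvC costs k)) = none := by
        rw [List.find?_eq_none]
        intro x hx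
        obtain ⟨r, hr, hxr⟩ := List.mem_iff_getElem.1 hx
        have hrl : k + 1 + r < costs.length := by
          have := hr; simp [List.length_drop] at this; omega
        have hxc : x = pvC costs (k+1+r) := by
          rw [← hxr, List.getElem_drop, pvC, List.getD_eq_getElem _ _ hrl]
        have := hmin (k+1+r) (by omega) (by omega)
        simp [hxc]
        omega
      rw [pvSpec, hnone, pvC, List.getD_eq_getElem _ _ hk, ← List.getD_eq_getElem costs 0 hk,
        ← pvC, ← hv, hFk]
    · obtain ⟨m, hm1, hm2, hm3, hm4, hm5⟩ := h6 k hk hmem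
      have hsome : (costs.drop (k+1)).find? (fun x => decide (x ≤ pvC costs k))
          = some (pvC costs m) := by
        rw [List.find?_eq_some_iff_getElem]
        refine ⟨by simpa using hm3, m - (k+1), by simp [List.length_drop]; omega, ?_, ?_⟩
        · rw [List.getElem_drop, pvC, List.getD_eq_getElem _ _ hm2]
          congr 1
          omega
        · intro r hr
          have hkk : k < k+1+r := by omega
          have hkm : k+1+r < m := by omega
          have := hm4 (k+1+r) hkk hkm
          rw [List.getElem_drop]
          simp only [Bool.not_eq_eq_eq_not, Bool.not_true, decide_eq_false_iff_not, not_le]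
          rw [← List.getD_eq_getElem costs 0, ← pvC]
          exact this
      rw [pvSpec, hsome, ← hFk]
      exact hm5

theorem pvA_eq_map (costs : List Int) :
    final_supply_costs costs = (List.range costs.length).map (pvSpec costs) := by
  unfold final_supply_costs
  obtain ⟨st', h⟩ := pvAGo_spec costs costs.length 0 costs []
    (by omega)
    ⟨rfl, by simp, by simp, by simp, by simp, by omega, fun j _ => rfl⟩
  rw [List.range_eq_range']
  exact (pvExtract costs _ st' h).trans (by rw [List.range_eq_range'])

-- B's while-scan computes exactly the first-later-cost-≤ lookup of pvSpec
theorem pvScan_find (costs : List Int) (c : Int) (i : Nat) :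
    (if pvScan costs c i < costs.length then c - costs.getD (pvScan costs c i) 0 else c)
      = match (costs.drop i).find? (fun x => decide (x ≤ c)) with
        | none => c | some x => c - x := by
  by_cases h : i < costs.length
  · have hdrop : costs.drop i = costs[i] :: costs.drop (i+1) := List.drop_eq_getElem_cons h
    by_cases hc : costs.getD i 0 > c
    · have hstep : pvScan costs c i = pvScan costs c (i+1) := by
        rw [pvScan, dif_pos h, if_pos hc]
      have hp : (decide (costs[i] ≤ c)) = false := by
        simp only [decide_eq_false_iff_not, not_le]
        rw [← List.getD_eq_getElem costs 0 h]
        exact hc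
      rw [hstep, hdrop, List.find?_cons_of_neg (p := fun x => decide (x ≤ c)) (by simp [hp])]
      exact pvScan_find costs c (i+1)
    · have hstep : pvScan costs c i = i := by
        rw [pvScan, dif_pos h, if_neg hc]
      have hp : (decide (costs[i] ≤ c)) = true := by
        simp only [decide_eq_true_eq]
        rw [← List.getD_eq_getElem costs 0 h]
        omega
      rw [hstep, hdrop, List.find?_cons_of_pos (p := fun x => decide (x ≤ c)) hp, if_pos h,
        List.getD_eq_getElem costs 0 h]
  · have hstep : pvScan costs c i = i := by
      rw [pvScan, dif_neg h]
    rw [hstep, if_neg h, List.drop_eq_nil_of_le (by omega), List.find?_nil]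
termination_by costs.length - i
decreasing_by omega

theorem pvB_eq_map (costs : List Int) :
    final_supply_costs_alt costs = (List.range costs.length).map (pvSpec costs) := by
  unfold final_supply_costs_alt
  refine (pvFold_app _ (PySem.List.enumerate costs) []).trans ?_
  rw [List.nil_append]
  apply List.ext_getElem
  · simp [PySem.List.length_enumerate]
  · intro k hk1 hk2
    simp only [List.getElem_map, PySem.List.getElem_enumerate, List.getElem_range]
    have hk : k < costs.length := by simpa [PySem.List.length_enumerate] using hk1
    have htn : ((0:Int) + (k:Int)).toNat = k := by omega
    have hc : pvC costs k = costs[k] := List.getD_eq_getElem costs 0 hk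
    rw [htn]
    rw [pvScan_find costs costs[k] (k+1)]
    simp only [pvSpec, hc]

-- ===== VERDICT (by name: the statement is the Claim_ definition above) =====
theorem final_supply_costs_spec : Claim_equal_final_supply_costs := by
  intro costs _
  unfold Spec_final_supply_costs
  rw [pvA_eq_map, pvB_eq_map]
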